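-- pv_equiv track=rewrite | github.com/SangRakee/AlgoriGym | Programmers/k번째수.py | solution
-- ===== SOURCE A (Python) =====
-- def solution(array, commands):
--     answer = []
--     result = []
--     for x in range(len(commands)):
--         i, j, k = commands[x][0] - 1, commands[x][1] - 1, commands[x][2] - 1
--         for y in range(len(array)):
--             if y >= i and y <= j:
--                 answer.append(array[y])
--         answer.sort()
--         result.append(answer[k])
--         answer = []
--
--     return result
-- ===== SOURCE B (Python) =====
-- def _insert_sorted(best, v):
--     # insert v into the ascending list best, after any equal values
--     for idx in range(len(best)):
--         if v < best[idx]: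
--             return best[:idx] + [v] + best[idx:]
--     return best + [v]
--
--
-- def solution(array, commands):
--     n = len(array)
--     result = []
--     for c in commands:
--         i, j, k = c[0], c[1], c[2]
--         best = []  # the k smallest values seen so far in array[i-1:j], ascending
--         for y in range(max(i - 1, 0), min(j, n)):
--             best = _insert_sorted(best, array[y])
--             if len(best) > k:
--                 best.pop()
--         result.append(best[k - 1])
--     return result
-- ===== Notes on version B (the rewrite author's own statement) =====
-- stated objective: alternative
-- what changed: Instead of scanning the whole array with a filter, fully sorting each commanded subrange and indexing it, B walks the clamped index range directly and maintains only the k smallest values seen so far in a bounded ascending buffer (incremental partial selection), answering from the buffer's last slot.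
-- outside the precondition, e.g. on solution([1, 2, 3], [[1, 3, 0]]): A returns [3], B raises IndexError
import Mathlib
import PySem

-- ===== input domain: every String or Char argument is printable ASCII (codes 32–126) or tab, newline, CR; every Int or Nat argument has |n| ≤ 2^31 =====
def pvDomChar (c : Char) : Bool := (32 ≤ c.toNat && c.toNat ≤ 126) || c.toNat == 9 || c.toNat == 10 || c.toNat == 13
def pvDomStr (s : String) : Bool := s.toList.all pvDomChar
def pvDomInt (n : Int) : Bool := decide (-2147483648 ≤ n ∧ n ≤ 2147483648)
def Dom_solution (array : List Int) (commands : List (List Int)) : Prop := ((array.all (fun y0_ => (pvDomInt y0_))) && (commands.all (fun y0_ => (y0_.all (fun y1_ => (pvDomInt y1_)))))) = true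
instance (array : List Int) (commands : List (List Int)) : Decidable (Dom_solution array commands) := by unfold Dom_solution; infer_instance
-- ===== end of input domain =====

-- B replaces A's full scan-filter-and-sort of each commanded subrange by incremental partial
-- selection: it walks the index range directly and maintains only the k smallest values seen so
-- far in an ascending buffer, reading off its last slot (objective: alternative algorithm).

-- ===== PORT A =====
def solution (array : List Int) (commands : List (List Int)) : List Int :=
  (PySem.List.pyRange 0 (PySem.List.len commands) 1).foldl (fun result x =>
    let c := PySem.List.pyGetD commands x []
    let i := PySem.List.pyGetD c 0 0 - 1
    let j := PySem.List.pyGetD c 1 0 - 1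
    let k := PySem.List.pyGetD c 2 0 - 1
    let answer := (PySem.List.pyRange 0 (PySem.List.len array) 1).foldl
      (fun answer y => if y ≥ i ∧ y ≤ j then answer ++ [PySem.List.pyGetD array y 0] else answer) []
    let answer := PySem.List.sorted answer (fun v => v) false
    result ++ [PySem.List.pyGetD answer k 0]) []

-- ===== PORT B =====
-- port of Source B's _insert_sorted: the scanning for-loop with early return becomes the obvious
-- structural recursion over best
def insertSortedB : List Int → Int → List Int
  | [], v => [v]
  | x :: xs, v => if v < x then v :: x :: xs else x :: insertSortedB xs v

def solution_alt (array : List Int) (commands : List (List Int)) : List Int :=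
  commands.foldl (fun result c =>
    let i := PySem.List.pyGetD c 0 0
    let j := PySem.List.pyGetD c 1 0
    let k := PySem.List.pyGetD c 2 0
    let best := (PySem.List.pyRange (max (i - 1) 0) (min j (PySem.List.len array)) 1).foldl
      (fun best y =>
        let nb := insertSortedB best (PySem.List.pyGetD array y 0)
        -- best.pop() removes the last element; nb is nonempty here, so this is List.dropLast (exact)
        if PySem.List.len nb > k then nb.dropLast else nb) []
    result ++ [PySem.List.pyGetD best (k - 1) 0]) []

-- ===== PRECONDITION & SPEC =====
-- Pre_ excludes commands that are malformed (fewer than 3 entries) or whose rank k lies outside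
-- 1..(size of the selected index range): there A either raises IndexError or, for k ≤ 0,
-- answer[k-1] silently wraps around and counts from the large end — an accident of Python's
-- negative indexing — while B's k-smallest buffer is empty there and raises.
def Pre_solution (array : List Int) (commands : List (List Int)) : Prop :=
  ∀ c ∈ commands, 3 ≤ c.length ∧ 1 ≤ PySem.List.pyGetD c 2 0 ∧
    PySem.List.pyGetD c 2 0 ≤
      min (PySem.List.pyGetD c 1 0) (array.length : Int) - max (PySem.List.pyGetD c 0 0 - 1) 0
instance (array : List Int) (commands : List (List Int)) : Decidable (Pre_solution array commands) := by
  unfold Pre_solution; infer_instance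

def pvWitness_solution : List Int × List (List Int) := ([3, 1, 2, 5], [[1, 3, 2], [2, 4, 3]])

def Spec_solution (array : List Int) (commands : List (List Int)) (out : List Int) : Prop := out = solution_alt array commands
instance (array : List Int) (commands : List (List Int)) (out : List Int) : Decidable (Spec_solution array commands out) := by unfold Spec_solution; infer_instance

-- ===== CLAIM (what is proved, stated in full; the proofs are below) =====
def Claim_equal_solution : Prop := ∀ (array : List Int) (commands : List (List Int)), Dom_solution array commands → Pre_solution array commands → Spec_solution array commands (solution array commands)

-- ===== LEMMAS AND PROOFS =====

-- Source B's insertion helper is insertion into a sorted list before the first strictly larger element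
theorem insertSortedB_eq_insertBy (b : List Int) (v : Int) :
    insertSortedB b v = PySem.List.insertBy (fun a b => decide (a < b)) v b := by
  induction b with
  | nil => rfl
  | cons x xs ih => simp only [insertSortedB, PySem.List.insertBy]; split <;> simp [ih] <;> (intro h; omega)

theorem sorted_append_singleton (l : List Int) (v : Int) :
    PySem.List.sorted (l ++ [v]) (fun x => x) false
      = insertSortedB (PySem.List.sorted l (fun x => x) false) v := by
  rw [insertSortedB_eq_insertBy, PySem.List.sorted_eq_foldl_insertBy,
    PySem.List.sorted_eq_foldl_insertBy, List.foldl_append]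
  rfl

theorem take_cons_take {α : Type} (m : Nat) (x : α) (xs : List α) :
    List.take m (x :: List.take m xs) = List.take m (x :: xs) := by
  cases m with
  | zero => simp
  | succ m' => simp [List.take_take]

theorem take_insert_take (kn : Nat) (s : List Int) (v : Int) :
    List.take kn (insertSortedB (List.take kn s) v) = List.take kn (insertSortedB s v) := by
  induction s generalizing kn with
  | nil => simp
  | cons x xs ih =>
    cases kn with
    | zero => simp
    | succ m =>
      simp only [List.take_succ_cons, insertSortedB]
      split
      · simp [take_cons_take]
      · simp [ih m]

-- the fold of Source B's inner loop computes the k smallest values, ascending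
theorem best_eq_take_sorted (k : Int) (hk : 1 ≤ k) (vs : List Int) :
    vs.foldl (fun best v =>
        let nb := insertSortedB best v
        if PySem.List.len nb > k then nb.dropLast else nb) []
      = List.take k.toNat (PySem.List.sorted vs (fun x => x) false) := by
  induction vs using List.reverseRecOn with
  | nil => simp [PySem.List.sorted]
  | append_singleton vs v ih =>
    rw [List.foldl_append, List.foldl_cons, List.foldl_nil, ih, sorted_append_singleton]
    set s := PySem.List.sorted vs (fun x => x) false with hs
    rw [← take_insert_take]
    set t := insertSortedB (List.take k.toNat s) v with ht
    simp only [PySem.List.len_eq]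
    have hlen : t.length = (List.take k.toNat s).length + 1 := by
      rw [ht]; clear ht
      induction (List.take k.toNat s) with
      | nil => rfl
      | cons x xs ih2 => simp [insertSortedB]; split <;> simp [ih2]
    by_cases hc : (t.length : Int) > k
    · rw [if_pos hc]
      have : t.length = k.toNat + 1 := by
        have := List.length_take_le k.toNat s
        omega
      rw [List.dropLast_eq_take, this]
      simp
    · rw [if_neg hc]
      have : t.length ≤ k.toNat := by omega
      rw [List.take_of_length_le this]

-- A's filtered scan over all indices is exactly the clamped index range
theorem filter_pyRange_clamp (l u : Int) :
    ∀ (n : Nat) (a b : Int), b - a = (n : Int) →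
      (PySem.List.pyRange a b 1).filter (fun y => decide (y ≥ l ∧ y ≤ u))
        = PySem.List.pyRange (max a l) (min (u + 1) b) 1 := by
  intro n
  induction n with
  | zero =>
    intro a b h
    rw [PySem.List.pyRange_one_eq_nil (by omega), PySem.List.pyRange_one_eq_nil (by omega)]
    rfl
  | succ m ih =>
    intro a b h
    rw [PySem.List.pyRange_one_cons (by omega), List.filter_cons]
    by_cases hcl : a ≥ l ∧ a ≤ u
    · rw [if_pos (by simpa using hcl), ih (a + 1) b (by omega)]
      have h1 : max a l = a := by omega
      have h2 : max (a + 1) l = a + 1 := by omega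
      rw [h1, h2, PySem.List.pyRange_one_cons (show a < min (u + 1) b by omega)]
    · rw [if_neg (by simpa using hcl), ih (a + 1) b (by omega)]
      rcases not_and_or.mp hcl with hl | hu
      · have h1 : max a l = l := by omega
        have h2 : max (a + 1) l = l := by omega
        rw [h1, h2]
      · have h1 : min (u + 1) b ≤ max a l := by omega
        have h2 : min (u + 1) b ≤ max (a + 1) l := by omega
        rw [PySem.List.pyRange_one_eq_nil h1, PySem.List.pyRange_one_eq_nil h2]

-- the two per-command bodies agree under Pre_'s bounds for that command
theorem per_command (array : List Int) (c : List Int)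
    (hk1 : 1 ≤ PySem.List.pyGetD c 2 0)
    (hk2 : PySem.List.pyGetD c 2 0 ≤
      min (PySem.List.pyGetD c 1 0) (array.length : Int) - max (PySem.List.pyGetD c 0 0 - 1) 0) :
    PySem.List.pyGetD
      (PySem.List.sorted
        ((PySem.List.pyRange 0 (array.length : Int) 1).foldl
          (fun answer y =>
            if y ≥ PySem.List.pyGetD c 0 0 - 1 ∧ y ≤ PySem.List.pyGetD c 1 0 - 1 then
              answer ++ [PySem.List.pyGetD array y 0] else answer) [])
        (fun v => v) false)
      (PySem.List.pyGetD c 2 0 - 1) 0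
    = PySem.List.pyGetD
      ((PySem.List.pyRange (max (PySem.List.pyGetD c 0 0 - 1) 0)
          (min (PySem.List.pyGetD c 1 0) (array.length : Int)) 1).foldl
        (fun best y =>
          let nb := insertSortedB best (PySem.List.pyGetD array y 0)
          if PySem.List.len nb > PySem.List.pyGetD c 2 0 then nb.dropLast else nb) [])
      (PySem.List.pyGetD c 2 0 - 1) 0 := by
  set i := PySem.List.pyGetD c 0 0 with hi
  set j := PySem.List.pyGetD c 1 0 with hj
  set k := PySem.List.pyGetD c 2 0 with hk
  -- A's filtered scan is a filter-map over the index range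
  have hA : (PySem.List.pyRange 0 (array.length : Int) 1).foldl
      (fun answer y => if y ≥ i - 1 ∧ y ≤ j - 1 then
        answer ++ [PySem.List.pyGetD array y 0] else answer) []
      = ((PySem.List.pyRange 0 (array.length : Int) 1).filter
          (fun y => decide (y ≥ i - 1 ∧ y ≤ j - 1))).map (fun y => PySem.List.pyGetD array y 0) := by
    have h := PySem.List.foldl_append_if (fun y => decide (y ≥ i - 1 ∧ y ≤ j - 1))
      (fun y => PySem.List.pyGetD array y 0) (PySem.List.pyRange 0 (array.length : Int) 1) []
    simpa using h
  rw [hA, filter_pyRange_clamp (i - 1) (j - 1) array.length 0 (array.length : Int) (by simp)]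
  have h1 : max (0 : Int) (i - 1) = max (i - 1) 0 := max_comm _ _
  have h2 : j - 1 + 1 = j := by ring
  rw [h1, h2]
  -- B's fold over indices is a fold over the selected values
  set vs := (PySem.List.pyRange (max (i - 1) 0) (min j (array.length : Int)) 1).map
    (fun y => PySem.List.pyGetD array y 0) with hvs
  have hB : (PySem.List.pyRange (max (i - 1) 0) (min j (array.length : Int)) 1).foldl
      (fun best y =>
        let nb := insertSortedB best (PySem.List.pyGetD array y 0)
        if PySem.List.len nb > k then nb.dropLast else nb) []
      = List.take k.toNat (PySem.List.sorted vs (fun x => x) false) := by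
    rw [hvs, ← best_eq_take_sorted k hk1, List.foldl_map]
  rw [hB]
  -- both sides read off index k-1, which take k preserves
  have hlenvs : vs.length = (min j (array.length : Int) - max (i - 1) 0).toNat := by
    simp [hvs, PySem.List.length_pyRange_one]
  have hcount : (k : Int) ≤ min j (array.length : Int) - max (i - 1) 0 := hk2
  have hvslen : k.toNat ≤ vs.length := by omega
  have hs1 : (PySem.List.sorted vs (fun x => x) false).length = vs.length :=
    PySem.List.length_sorted vs _ _
  rw [PySem.List.pyGetD_eq_getElem _ 0 (by omega) (by omega),
    PySem.List.pyGetD_eq_getElem _ 0 (by omega)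
      (by simp [List.length_take, hs1]; omega),
    List.getElem_take]

-- ===== VERDICT (by name: the statement is the Claim_ definition above) =====
theorem solution_spec : Claim_equal_solution := by
  intro array commands _ hpre
  show solution array commands = solution_alt array commands
  simp only [solution, solution_alt, PySem.List.len_eq]
  refine Eq.trans (PySem.List.foldl_pyRange_zero_pyGetD' commands ([] : List Int)
    (fun result c => result ++ [PySem.List.pyGetD
      (PySem.List.sorted
        ((PySem.List.pyRange 0 (array.length : Int) 1).foldl
          (fun answer y =>
            if y ≥ PySem.List.pyGetD c 0 0 - 1 ∧ y ≤ PySem.List.pyGetD c 1 0 - 1 then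
              answer ++ [PySem.List.pyGetD array y 0] else answer) [])
        (fun v => v) false)
      (PySem.List.pyGetD c 2 0 - 1) 0]) ([] : List Int)) ?_
  apply PySem.List.foldl_congr_mem
  intro acc c hc
  obtain ⟨_, hk1, hk2⟩ := hpre c hc
  have h := per_command array c hk1 hk2
  simp only [PySem.List.len_eq] at h ⊢
  rw [h]
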